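-- pv_equiv track=rewrite | github.com/ShaodongWei/hemoglobin-structural-variants | scripts/functions.py | select_peptide
-- ===== SOURCE A (Python) =====
-- def select_peptide(peptides):
--     # This function counts the mutations in a peptide
--     def count_mutations(peptide):
--         return sum(1 for char in peptide if char.islower())
--
--     # This list will store the count of mutations and the peptide length
--     peptide_info = [(count_mutations(peptide), len(peptide), peptide) for peptide in peptides]
--
--     # Filter to find all peptides with more than one mutation
--     multiple_mutations = [info for info in peptide_info if info[0] > 1]
--
--     if multiple_mutations:
--         # If there are multiple, select the one with the most mutations, or the longest if tied
--         return max(multiple_mutations, key=lambda x: (x[0], x[1]))[2]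
--     else:
--         # If no peptides have multiple mutations, select the longest peptide
--         return max(peptide_info, key=lambda x: x[1])[2]
-- ===== SOURCE B (Python) =====
-- def select_peptide(peptides):
--     # Unified composite key: a peptide with >1 mutations gets key (count, length),
--     # any other peptide gets key (0, length).  If any multi-mutation peptide exists
--     # it dominates (count >= 2 > 0), and they are ordered by (count, length) exactly
--     # as A's first branch; otherwise all first components are 0 and the order is by
--     # length alone, A's second branch.  Sorting descending is stable, so the first
--     # element of the sorted list is the first-seen maximum, matching Python's max.
--     def key(p):
--         c = sum(1 for ch in p if ch.islower())
--         return (c if c > 1 else 0, len(p))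
--     return sorted(peptides, key=key, reverse=True)[0]
-- ===== Notes on version B (the rewrite author's own statement) =====
-- stated objective: alternative
-- what changed: Replaces A's filter plus two-branch max calls with a single composite sort key ((count if count>1 else 0, length)) and one stable descending sort, returning the first element; the key unification eliminates the filter and the branch, and sort stability reproduces max's first-seen tie-breaking.
-- outside the precondition, e.g. on select_peptide([]): A raises ValueError, B raises IndexError
import Mathlib
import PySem

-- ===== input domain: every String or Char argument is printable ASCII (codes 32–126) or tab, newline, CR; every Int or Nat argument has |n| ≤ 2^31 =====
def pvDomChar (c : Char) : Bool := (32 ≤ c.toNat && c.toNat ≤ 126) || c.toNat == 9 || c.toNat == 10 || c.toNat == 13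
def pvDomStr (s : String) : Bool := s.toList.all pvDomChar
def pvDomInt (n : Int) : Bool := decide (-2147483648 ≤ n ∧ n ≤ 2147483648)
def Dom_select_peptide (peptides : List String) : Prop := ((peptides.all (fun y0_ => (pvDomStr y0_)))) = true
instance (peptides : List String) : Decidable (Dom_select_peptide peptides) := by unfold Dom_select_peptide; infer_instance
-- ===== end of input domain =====

-- B replaces A's filter-and-two-maxes with a single composite sort key ((count if count>1 else 0), length)
-- and one stable descending sort, returning the first element; same result, different algorithm.

-- ===== PORT A =====
-- count_mutations: sum(1 for char in peptide if char.islower())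
def pvCountMut (peptide : String) : Int :=
  peptide.toList.foldl (fun acc c => if PySem.Chars.islower c then acc + 1 else acc) 0

-- one element of peptide_info
def pvInfo (p : String) : Int × Int × String := (pvCountMut p, PySem.Str.len p, p)

-- max(.., key=lambda x: (x[0], x[1])) — Python's max keeps the first maximum, later items win only on strictly greater key
def pvMaxKey2 (best x : Int × Int × String) : Int × Int × String :=
  if best.1 < x.1 ∨ (x.1 = best.1 ∧ best.2.1 < x.2.1) then x else best

-- max(.., key=lambda x: x[1])
def pvMaxKeyLen (best x : Int × Int × String) : Int × Int × String :=
  if best.2.1 < x.2.1 then x else best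

def select_peptide (peptides : List String) : String :=
  let peptide_info := peptides.map pvInfo
  let multiple_mutations := peptide_info.filter (fun info => decide (1 < info.1))
  match multiple_mutations with
  | h :: t => (t.foldl pvMaxKey2 h).2.2
  | [] =>
    match peptide_info with
    | h :: t => (t.foldl pvMaxKeyLen h).2.2
    | [] => ""   -- max([]) raises ValueError; excluded by Pre_

-- ===== PORT B =====
def pvCountMutB (peptide : String) : Int :=
  peptide.toList.foldl (fun acc c => if PySem.Chars.islower c then acc + 1 else acc) 0

-- sorted(peptides, key=lambda p: (c if c > 1 else 0, len(p)), reverse=True)[0]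
def select_peptide_alt (peptides : List String) : String :=
  match PySem.List.sorted2 peptides
      (fun p => if 1 < pvCountMutB p then pvCountMutB p else 0)
      (fun p => PySem.Str.len p) true with
  | m :: _ => m
  | [] => ""   -- [][0] raises IndexError; excluded by Pre_

-- ===== PRECONDITION & SPEC =====
-- Pre_ excludes only the empty list, on which A's max([]) raises ValueError (and B raises IndexError).
def Pre_select_peptide (peptides : List String) : Prop := peptides ≠ []
instance (peptides : List String) : Decidable (Pre_select_peptide peptides) := by unfold Pre_select_peptide; infer_instance
def pvWitness_select_peptide : List String := (["ab", "XY"])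

def Spec_select_peptide (peptides : List String) (out : String) : Prop := out = select_peptide_alt peptides
instance (peptides : List String) (out : String) : Decidable (Spec_select_peptide peptides out) := by unfold Spec_select_peptide; infer_instance

-- ===== CLAIM (what is proved, stated in full; the proofs are below) =====
def Claim_equal_select_peptide : Prop := ∀ (peptides : List String), Dom_select_peptide peptides → Pre_select_peptide peptides → Spec_select_peptide peptides (select_peptide peptides)

-- ===== LEMMAS AND PROOFS =====

-- string-level versions of the two folds inside A's maxes
def pvStepA2 (b x : String) : String :=
  if pvCountMut b < pvCountMut x ∨ (pvCountMut x = pvCountMut b ∧ PySem.Str.len b < PySem.Str.len x) then x else b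
def pvStepAL (b x : String) : String :=
  if PySem.Str.len b < PySem.Str.len x then x else b

-- B's composite key and the strict "x beats b" test induced by the descending stable sort
def pvK1 (p : String) : Int := if 1 < pvCountMut p then pvCountMut p else 0
def pvBeats (b x : String) : Bool :=
  decide (pvK1 b < pvK1 x) || (!decide (pvK1 x < pvK1 b) && decide (PySem.Str.len b < PySem.Str.len x))
def pvRunB (h : String) (t : List String) : String :=
  t.foldl (fun b x => if pvBeats b x then x else b) h

theorem pv_foldA2_map (t : List String) (h : String) :
    (t.map pvInfo).foldl pvMaxKey2 (pvInfo h) = pvInfo (t.foldl pvStepA2 h) := by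
  induction t generalizing h with
  | nil => rfl
  | cons x t ih =>
      simp only [List.map_cons, List.foldl]
      rw [show pvMaxKey2 (pvInfo h) (pvInfo x) = pvInfo (pvStepA2 h x) from by
        simp only [pvMaxKey2, pvStepA2, pvInfo]; split_ifs <;> rfl]
      exact ih (pvStepA2 h x)

theorem pv_foldAL_map (t : List String) (h : String) :
    (t.map pvInfo).foldl pvMaxKeyLen (pvInfo h) = pvInfo (t.foldl pvStepAL h) := by
  induction t generalizing h with
  | nil => rfl
  | cons x t ih =>
      simp only [List.map_cons, List.foldl]
      rw [show pvMaxKeyLen (pvInfo h) (pvInfo x) = pvInfo (pvStepAL h x) from by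
        simp only [pvMaxKeyLen, pvStepAL, pvInfo]; split_ifs <;> rfl]
      exact ih (pvStepAL h x)

-- head of the insertion-sort fold = the first-seen running maximum
theorem pv_head_insert_foldl (l : List String) (a : String) (acc : List String) :
    ∃ r, l.foldl (fun s x => PySem.List.insertBy (fun u v => pvBeats v u) x s) (a :: acc)
        = (l.foldl (fun b x => if pvBeats b x then x else b) a) :: r := by
  induction l generalizing a acc with
  | nil => exact ⟨acc, rfl⟩
  | cons x l ih =>
      simp only [List.foldl, PySem.List.insertBy]
      by_cases hb : pvBeats a x
      · simpa [hb] using ih x (a :: acc)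
      · simpa [hb] using ih a (PySem.List.insertBy (fun u v => pvBeats v u) x acc)

theorem pv_alt_eq_run (h : String) (t : List String) :
    select_peptide_alt (h :: t) = pvRunB h t := by
  have hsort : PySem.List.sorted2 (h :: t)
      (fun p => if 1 < pvCountMutB p then pvCountMutB p else 0)
      (fun p => PySem.Str.len p) true
      = t.foldl (fun s x => PySem.List.insertBy (fun u v => pvBeats v u) x s) [h] := by
    rfl
  obtain ⟨r, hr⟩ := pv_head_insert_foldl t h []
  unfold select_peptide_alt
  rw [hsort, hr]
  rfl

-- if the current best has >1 mutations, the run keeps only multi-mutation candidates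
theorem pv_run_of_multi (t : List String) (h : String) (hm : 1 < pvCountMut h) :
    pvRunB h t = (t.filter (fun p => decide (1 < pvCountMut p))).foldl pvStepA2 h := by
  induction t generalizing h with
  | nil => rfl
  | cons x t ih =>
      by_cases hx : 1 < pvCountMut x
      · have hcond : pvBeats h x = true ↔
            (pvCountMut h < pvCountMut x ∨
              (pvCountMut x = pvCountMut h ∧ PySem.Str.len h < PySem.Str.len x)) := by
          simp [pvBeats, pvK1, hm, hx]
          omega
        have hstep : (if pvBeats h x then x else h) = pvStepA2 h x := by
          by_cases hc : pvCountMut h < pvCountMut x ∨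
              (pvCountMut x = pvCountMut h ∧ PySem.Str.len h < PySem.Str.len x)
          · rw [pvStepA2, if_pos hc, if_pos (hcond.mpr hc)]
          · rw [pvStepA2, if_neg hc, if_neg (fun hb => hc (hcond.mp hb))]
        have hmult : 1 < pvCountMut (pvStepA2 h x) := by
          simp only [pvStepA2]; split_ifs <;> assumption
        simp only [pvRunB, List.foldl] at *
        rw [List.filter_cons_of_pos (by simp [hx]), List.foldl_cons, hstep]
        exact ih (pvStepA2 h x) hmult
      · have hbf : pvBeats h x = false := by
          simp [pvBeats, pvK1, hm, hx]
          omega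
        simp only [pvRunB, List.foldl] at *
        rw [List.filter_cons_of_neg (by simp [hx]), hbf]
        simpa using ih h hm

-- if the current best has ≤1 mutations: no multi in the tail → longest-by-length; else the
-- first multi element takes over and the multi run decides
theorem pv_run_of_small (t : List String) (h : String) (hm : ¬ 1 < pvCountMut h) :
    pvRunB h t =
      (match t.filter (fun p => decide (1 < pvCountMut p)) with
       | [] => t.foldl pvStepAL h
       | m :: ms => ms.foldl pvStepA2 m) := by
  induction t generalizing h with
  | nil => rfl
  | cons x t ih =>
      by_cases hx : 1 < pvCountMut x
      · have hbt : pvBeats h x = true := by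
          simp [pvBeats, pvK1, hm, hx]
          omega
        simp only [pvRunB, List.foldl] at *
        rw [List.filter_cons_of_pos (by simp [hx]), hbt]
        simpa using pv_run_of_multi t x hx
      · have hstep : (if pvBeats h x then x else h) = pvStepAL h x := by
          have hcond : pvBeats h x = true ↔ PySem.Str.len h < PySem.Str.len x := by
            simp [pvBeats, pvK1, hm, hx]
          by_cases hc : PySem.Str.len h < PySem.Str.len x
          · rw [pvStepAL, if_pos hc, if_pos (hcond.mpr hc)]
          · rw [pvStepAL, if_neg hc, if_neg (fun hb => hc (hcond.mp hb))]
        have hsm : ¬ 1 < pvCountMut (pvStepAL h x) := by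
          simp only [pvStepAL]; split_ifs <;> assumption
        simp only [pvRunB, List.foldl] at *
        rw [List.filter_cons_of_neg (by simp [hx]), hstep]
        exact ih (pvStepAL h x) hsm

-- ===== VERDICT (by name: the statement is the Claim_ definition above) =====
theorem select_peptide_spec : Claim_equal_select_peptide := by
  intro peptides _ hpre
  unfold Spec_select_peptide
  cases peptides with
  | nil => exact absurd rfl hpre
  | cons h t =>
      rw [pv_alt_eq_run]
      simp only [select_peptide]
      have hfm : ((h :: t).map pvInfo).filter (fun info => decide (1 < info.1))
          = ((h :: t).filter (fun p => decide (1 < pvCountMut p))).map pvInfo := by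
        rw [List.filter_map]; rfl
      by_cases hh : 1 < pvCountMut h
      · have : (h :: t).filter (fun p => decide (1 < pvCountMut p))
            = h :: t.filter (fun p => decide (1 < pvCountMut p)) := by simp [List.filter, hh]
        rw [hfm, this]
        simp only [List.map_cons]
        rw [pv_foldA2_map, pv_run_of_multi t h hh]
        rfl
      · have hft : (h :: t).filter (fun p => decide (1 < pvCountMut p))
            = t.filter (fun p => decide (1 < pvCountMut p)) := by simp [List.filter, hh]
        rw [hfm, hft, pv_run_of_small t h hh]
        cases hft2 : t.filter (fun p => decide (1 < pvCountMut p)) with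
        | nil =>
            simp only [List.map_nil, List.map_cons]
            rw [pv_foldAL_map]
            rfl
        | cons m ms =>
            simp only [List.map_cons]
            rw [pv_foldA2_map]
            rfl
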